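-- pv_equiv track=rewrite | github.com/maddie012/CS1 | madeleine elias whats in a name.py | last_name
-- ===== SOURCE A (Python) =====
-- def last_name(name):
--     '''
--     finds the last name by going backwards to find where the space is a turning it the right way again
--     Args:
--         name: the name the user inputed
--     returns:
--         The last name'''
--     last = name[::-1]
--     lstnm = ""
--     for i in last:
--         if i == " ":
--             break
--         else:
--             lstnm += i
--     rightnm = lstnm[::-1]
--     return rightnm
-- ===== SOURCE B (Python) =====
-- def last_name(name):
--     cur = ""
--     for ch in name:
--         if ch == " ":
--             cur = ""
--         else:
--             cur += ch
--     return cur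
-- ===== Notes on version B (the rewrite author's own statement) =====
-- stated objective: simpler
-- what changed: B does one forward pass maintaining the current token (reset on each space) instead of A's backward scan with early break plus two string reversals.
import Mathlib
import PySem

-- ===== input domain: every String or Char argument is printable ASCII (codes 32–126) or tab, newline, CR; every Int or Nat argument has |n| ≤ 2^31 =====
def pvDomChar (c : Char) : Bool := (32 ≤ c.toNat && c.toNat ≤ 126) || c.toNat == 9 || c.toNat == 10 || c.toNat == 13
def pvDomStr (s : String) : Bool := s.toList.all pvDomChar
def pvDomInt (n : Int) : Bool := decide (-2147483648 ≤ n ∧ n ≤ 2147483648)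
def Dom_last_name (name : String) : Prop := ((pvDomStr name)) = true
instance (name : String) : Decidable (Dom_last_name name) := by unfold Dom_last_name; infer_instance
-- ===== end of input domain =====

-- B replaces A's backward scan with break plus two reversals by one forward pass that keeps
-- the current space-delimited token, resetting it on each space (objective: simpler).

-- ===== PORT A =====
-- the 'for i in last: if i == " ": break else lstnm += i' loop, with break = stop recursing
def lnLoopA (acc : List Char) : List Char → List Char
  | [] => acc
  | c :: rest => if c = ' ' then acc else lnLoopA (acc ++ [c]) rest

def last_name (name : String) : String :=
  let last := (PySem.List.slice? name.toList none none (-1)).getD []   -- name[::-1]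
  let lstnm := lnLoopA [] last
  let rightnm := (PySem.List.slice? lstnm none none (-1)).getD []      -- lstnm[::-1]
  String.ofList rightnm

-- ===== PORT B =====
def last_name_alt (name : String) : String :=
  String.ofList (name.toList.foldl (fun cur c => if c = ' ' then [] else cur ++ [c]) [])

-- ===== PRECONDITION & SPEC =====
def Spec_last_name (name : String) (out : String) : Prop := out = last_name_alt name
instance (name : String) (out : String) : Decidable (Spec_last_name name out) := by unfold Spec_last_name; infer_instance

-- ===== CLAIM (what is proved, stated in full; the proofs are below) =====
def Claim_equal_last_name : Prop := ∀ (name : String), Dom_last_name name → Spec_last_name name (last_name name)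

-- ===== LEMMAS AND PROOFS =====
theorem lnLoopA_eq (cs acc : List Char) :
    lnLoopA acc cs = acc ++ cs.takeWhile (fun c => !(c == ' ')) := by
  induction cs generalizing acc with
  | nil => simp [lnLoopA]
  | cons c rest ih =>
    by_cases h : c = ' '
    · simp [lnLoopA, h]
    · simp [lnLoopA, h, ih]


theorem foldlB_eq (cs acc : List Char) :
    cs.foldl (fun cur c => if c = ' ' then [] else cur ++ [c]) acc =
      if ' ' ∈ cs then (cs.reverse.takeWhile (fun c => !(c == ' '))).reverse
      else acc ++ cs := by
  induction cs using List.reverseRecOn generalizing acc with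
  | nil => simp
  | append_singleton ds c ih =>
    rw [List.foldl_append]
    by_cases h : c = ' '
    · simp [h]
    · simp only [List.foldl_cons, List.foldl_nil, if_neg h]
      rw [ih]
      have hp : (!(c == ' ')) = true := by simp [h]
      by_cases hm : ' ' ∈ ds
      · simp [hm, hp]
      · have hmem : ' ' ∉ ds ++ [c] := by
          simp only [List.mem_append, List.mem_singleton]
          rintro (h1 | h2)
          · exact hm h1
          · exact h h2.symm
        rw [if_neg hm, if_neg hmem, List.append_assoc]

-- ===== VERDICT (by name: the statement is the Claim_ definition above) =====
theorem last_name_spec : Claim_equal_last_name := by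
  intro name _
  unfold Spec_last_name last_name last_name_alt
  simp only [PySem.List.slice?_none_none_neg_one, Option.getD_some]
  rw [lnLoopA_eq, foldlB_eq]
  by_cases hm : ' ' ∈ name.toList
  · simp [hm]
  · have : name.toList.reverse.takeWhile (fun c => !(c == ' ')) = name.toList.reverse := by
      rw [List.takeWhile_eq_self_iff]
      intro a ha
      simp only [Bool.not_eq_true', beq_eq_false_iff_ne, ne_eq]
      intro he; exact hm (by simpa [he] using List.mem_reverse.mp ha)
    simp [hm, this]
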